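-- pv_equiv track=rewrite | github.com/Fondamenti18/fondamenti-di-programmazione | students/1754654/homework01/program02.py | letter_quantity
-- ===== SOURCE A (Python) =====
-- def letter_quantity(number):
--     unita = ['','uno','due','tre','quattro','cinque','sei','sette','otto','nove',]
--     decine_2 = ['dieci','undici','dodici','tredici','quattordici','quindici','sedici','diciassette','diciotto','diciannove']
--     decine = ['','dieci','venti','trenta','quaranta','cinquanta','sessanta','settanta','ottanta','novanta']
--     centinaia = ['cento']
--
--     r_value = ''
--     i_value = int(number)
--
--     if 0 < i_value <= 9:
--         r_value = unita[i_value]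
--
--     if 9 < i_value <= 99:
--         if i_value <= 19:
--             d_app = str(i_value)
--             r_value = r_value + decine_2[int(d_app[1])]
--         else:
--             c_app = str(i_value)
--             if c_app[1] == '1' or c_app[1] == '8':
--                 r_value = r_value + decine[int(c_app[0])][:-1] + unita[int(c_app[1])]
--
--             else:
--                 r_value = r_value + decine[int(c_app[0])] + unita[int(c_app[1])]
--
--     if 99 < i_value <= 999:
--         h_app = str(i_value)
--         if h_app[0] == '1':
--             r_value = centinaia[0] + letter_quantity(h_app[-2:])
--         else:
--             if h_app[1] == '8':
--                 r_value = unita[int(h_app[0])] + centinaia[0][:-1] + letter_quantity(h_app[-2:])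
--             else:
--                 r_value = unita[int(h_app[0])] + centinaia[0] + letter_quantity(h_app[-2:])
--
--     return r_value
-- ===== SOURCE B (Python) =====
-- def letter_quantity(number):
--     n = int(number)
--     if n < 1 or n > 999:
--         return ''
--     unita = ['', 'uno', 'due', 'tre', 'quattro', 'cinque', 'sei', 'sette', 'otto', 'nove']
--     teens = ['dieci', 'undici', 'dodici', 'tredici', 'quattordici', 'quindici',
--              'sedici', 'diciassette', 'diciotto', 'diciannove']
--     decine = ['', 'dieci', 'venti', 'trenta', 'quaranta', 'cinquanta',
--               'sessanta', 'settanta', 'ottanta', 'novanta']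
--     h, r = divmod(n, 100)
--     t, u = divmod(r, 10)
--     if 10 <= r <= 19:
--         low = teens[u]
--     else:
--         tens_word = decine[t]
--         if u in (1, 8):
--             tens_word = tens_word[:-1]
--         low = tens_word + unita[u]
--     if h == 0:
--         return low
--     if h == 1:
--         return 'cento' + low
--     return unita[h] + ('cent' if t == 8 else 'cento') + low
-- ===== Notes on version B (the rewrite author's own statement) =====
-- stated objective: simpler
-- what changed: B extracts the digits arithmetically with divmod and assembles the word in one flat non-recursive pass, instead of A's converting to a string, indexing/slicing decimal digit characters and recursing on the last-two-character slice.
import Mathlib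
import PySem

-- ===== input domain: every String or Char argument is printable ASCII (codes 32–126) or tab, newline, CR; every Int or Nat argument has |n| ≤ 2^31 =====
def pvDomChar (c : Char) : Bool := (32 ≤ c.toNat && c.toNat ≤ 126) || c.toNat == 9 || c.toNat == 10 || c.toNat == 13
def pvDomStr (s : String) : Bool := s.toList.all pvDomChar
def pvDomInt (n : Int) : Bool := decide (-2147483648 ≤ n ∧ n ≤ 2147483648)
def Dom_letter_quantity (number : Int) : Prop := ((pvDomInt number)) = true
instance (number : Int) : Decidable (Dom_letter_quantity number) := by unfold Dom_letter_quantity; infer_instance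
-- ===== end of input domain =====

-- B spells 0-999 by extracting digits arithmetically (divmod) in one flat pass,
-- replacing A's string-indexing + recursion on the last two digits; objective: simpler.

-- ===== PORT A =====
-- int(c) for a single character obtained by string indexing (A's int(d_app[1]) etc.);
-- the `none`/parse-failure defaults are unreachable: the indexed string is a digit string.
def lqChInt (oc : Option Char) : Int :=
  match oc with
  | some c => (PySem.Int.ofChars? [c]).getD 0
  | none => 0

-- int(h_app[-2:]) : parse the last-two-characters slice (default unreachable: ≥ 2 digits)
def lqParse (cs : List Char) : Int :=
  (PySem.Int.ofChars? (PySem.List.slice cs (some (-2)) none)).getD 0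

-- A's recursion, made total with fuel (Python's recursion depth is at most 2:
-- the recursive call receives the last two digits, a value ≤ 99 which does not recurse).
def lqGo : Nat → Int → List Char
  | 0, _ => []  -- fuel guard, never reached from letter_quantity
  | fuel+1, number =>
    let unita : List (List Char) :=
      [[], "uno".toList, "due".toList, "tre".toList, "quattro".toList, "cinque".toList,
       "sei".toList, "sette".toList, "otto".toList, "nove".toList]
    let decine_2 : List (List Char) :=
      ["dieci".toList, "undici".toList, "dodici".toList, "tredici".toList, "quattordici".toList,
       "quindici".toList, "sedici".toList, "diciassette".toList, "diciotto".toList, "diciannove".toList]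
    let decine : List (List Char) :=
      [[], "dieci".toList, "venti".toList, "trenta".toList, "quaranta".toList, "cinquanta".toList,
       "sessanta".toList, "settanta".toList, "ottanta".toList, "novanta".toList]
    let centinaia : List (List Char) := ["cento".toList]
    let r_value : List Char := []
    let i_value := number
    let r_value := if 0 < i_value ∧ i_value ≤ 9 then
        PySem.List.pyGetD unita i_value []
      else r_value
    let r_value := if 9 < i_value ∧ i_value ≤ 99 then
        (if i_value ≤ 19 then
          let d_app := PySem.Int.toChars i_value
          r_value ++ PySem.List.pyGetD decine_2 (lqChInt (PySem.List.pyGet? d_app 1)) []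
        else
          let c_app := PySem.Int.toChars i_value
          if PySem.List.pyGet? c_app 1 = some '1' ∨ PySem.List.pyGet? c_app 1 = some '8' then
            r_value ++ PySem.List.slice (PySem.List.pyGetD decine (lqChInt (PySem.List.pyGet? c_app 0)) []) none (some (-1))
              ++ PySem.List.pyGetD unita (lqChInt (PySem.List.pyGet? c_app 1)) []
          else
            r_value ++ PySem.List.pyGetD decine (lqChInt (PySem.List.pyGet? c_app 0)) []
              ++ PySem.List.pyGetD unita (lqChInt (PySem.List.pyGet? c_app 1)) [])
      else r_value
    let r_value := if 99 < i_value ∧ i_value ≤ 999 then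
        let h_app := PySem.Int.toChars i_value
        if PySem.List.pyGet? h_app 0 = some '1' then
          PySem.List.pyGetD centinaia 0 [] ++ lqGo fuel (lqParse h_app)
        else
          if PySem.List.pyGet? h_app 1 = some '8' then
            PySem.List.pyGetD unita (lqChInt (PySem.List.pyGet? h_app 0)) []
              ++ PySem.List.slice (PySem.List.pyGetD centinaia 0 []) none (some (-1))
              ++ lqGo fuel (lqParse h_app)
          else
            PySem.List.pyGetD unita (lqChInt (PySem.List.pyGet? h_app 0)) []
              ++ PySem.List.pyGetD centinaia 0 []
              ++ lqGo fuel (lqParse h_app)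
      else r_value
    r_value

def letter_quantity (number : Int) : String := String.ofList (lqGo 2 number)

-- ===== PORT B =====
def lqAltUnita : List (List Char) :=
  [[], "uno".toList, "due".toList, "tre".toList, "quattro".toList, "cinque".toList,
   "sei".toList, "sette".toList, "otto".toList, "nove".toList]
def lqAltTeens : List (List Char) :=
  ["dieci".toList, "undici".toList, "dodici".toList, "tredici".toList, "quattordici".toList,
   "quindici".toList, "sedici".toList, "diciassette".toList, "diciotto".toList, "diciannove".toList]
def lqAltDecine : List (List Char) :=
  [[], "dieci".toList, "venti".toList, "trenta".toList, "quaranta".toList, "cinquanta".toList,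
   "sessanta".toList, "settanta".toList, "ottanta".toList, "novanta".toList]

def letter_quantity_alt (number : Int) : String :=
  let n := number
  if n < 1 ∨ 999 < n then String.ofList [] else
  let h := PySem.Int.floordiv n 100
  let r := PySem.Int.mod n 100
  let t := PySem.Int.floordiv r 10
  let u := PySem.Int.mod r 10
  let low :=
    if 10 ≤ r ∧ r ≤ 19 then PySem.List.pyGetD lqAltTeens u []
    else
      let tens_word := PySem.List.pyGetD lqAltDecine t []
      let tens_word := if u = 1 ∨ u = 8 then PySem.List.slice tens_word none (some (-1)) else tens_word
      tens_word ++ PySem.List.pyGetD lqAltUnita u []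
  if h = 0 then String.ofList low
  else if h = 1 then String.ofList ("cento".toList ++ low)
  else String.ofList (PySem.List.pyGetD lqAltUnita h [] ++ (if t = 8 then "cent".toList else "cento".toList) ++ low)

-- ===== PRECONDITION & SPEC =====
def Spec_letter_quantity (number : Int) (out : String) : Prop := out = letter_quantity_alt number
instance (number : Int) (out : String) : Decidable (Spec_letter_quantity number out) := by unfold Spec_letter_quantity; infer_instance

-- ===== CLAIM (what is proved, stated in full; the proofs are below) =====
def Claim_equal_letter_quantity : Prop := ∀ (number : Int), Dom_letter_quantity number → Spec_letter_quantity number (letter_quantity number)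

-- ===== LEMMAS AND PROOFS =====
set_option maxRecDepth 1000000 in
set_option maxHeartbeats 4000000 in
theorem lq_eq_small : ∀ m : Nat, m < 1000 → letter_quantity ((m : Nat) : Int) = letter_quantity_alt ((m : Nat) : Int) := by
  decide

theorem lqGo_out (fuel : Nat) (n : Int) (h : n < 1 ∨ 999 < n) : lqGo (fuel + 1) n = [] := by
  rw [lqGo]
  split_ifs <;> first | rfl | omega

theorem lq_out_of_range (number : Int) (h : number < 1 ∨ 999 < number) :
    letter_quantity number = letter_quantity_alt number := by
  have hA : letter_quantity number = String.ofList [] := by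
    show String.ofList (lqGo (1 + 1) number) = String.ofList []
    rw [lqGo_out 1 number h]
  have hB : letter_quantity_alt number = String.ofList [] := by
    unfold letter_quantity_alt
    rw [if_pos h]
  rw [hA, hB]

-- ===== VERDICT (by name: the statement is the Claim_ definition above) =====
theorem letter_quantity_spec : Claim_equal_letter_quantity := by
  intro number _
  unfold Spec_letter_quantity
  by_cases h : 1 ≤ number ∧ number ≤ 999
  · have hm : number = ((number.toNat : Nat) : Int) := by omega
    rw [hm]
    exact lq_eq_small number.toNat (by omega)
  · exact lq_out_of_range number (by omega)
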